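-- pv_equiv track=rewrite | github.com/bloggerwang1217/clef | src/datasets/syn/syn_dataset.py | _in_split
-- ===== SOURCE A (Python) =====
-- def _in_split(name: str, split_names: set) -> bool:
--     """Check if a sample belongs to the current split."""
--     # Direct match
--     if name in split_names:
--         return True
--
--     # Handle different naming conventions
--     # e.g., "beethoven_piano_sonatas_sonata01-1" vs "beethoven#sonata01-1"
--     for split_name in split_names:
--         if "#" in split_name:
--             prefix, piece = split_name.split("#", 1)
--             prefix_map = {
--                 "beethoven": "beethoven_piano_sonatas",
--                 "haydn": "haydn_piano_sonatas",
--                 "mozart": "mozart_piano_sonatas",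
--                 "chopin": "humdrum_chopin_first_editions",
--                 "joplin": "joplin",
--                 "scarlatti": "scarlatti_keyboard_sonatas",
--             }
--             if prefix in prefix_map:
--                 expected = f"{prefix_map[prefix]}_{piece}"
--                 if name == expected:
--                     return True
--         elif name.startswith("musesyn_"):
--             if name[8:] == split_name:
--                 return True
--
--     return False
-- ===== SOURCE B (Python) =====
-- _PREFIX_MAP = {
--     "beethoven": "beethoven_piano_sonatas",
--     "haydn": "haydn_piano_sonatas",
--     "mozart": "mozart_piano_sonatas",
--     "chopin": "humdrum_chopin_first_editions",
--     "joplin": "joplin",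
--     "scarlatti": "scarlatti_keyboard_sonatas",
-- }
--
--
-- def _in_split(name: str, split_names: set) -> bool:
--     """Check if a sample belongs to the current split (set-lookup version)."""
--     # Direct match
--     if name in split_names:
--         return True
--
--     # musesyn_<x> matches a split entry x (entries containing '#' are handled
--     # only by the prefix convention, never by this rule)
--     if name.startswith("musesyn_"):
--         rest = name[8:]
--         if "#" not in rest and rest in split_names:
--             return True
--
--     # long-form name <long>_<piece> matches the split entry <short>#<piece>
--     for short, long in _PREFIX_MAP.items():
--         p = long + "_"
--         if name.startswith(p) and short + "#" + name[len(p):] in split_names: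
--             return True
--
--     return False
-- ===== Notes on version B (the rewrite author's own statement) =====
-- stated objective: faster
-- what changed: Instead of scanning every split entry and forward-mapping each '#'-entry to an expected long name, B reconstructs from the name itself the at most two candidate split keys (the musesyn suffix and the short#piece form obtained by inverting the fixed 6-entry prefix map) and answers with O(1) set-membership lookups, removing the O(|split_names|) scan.
import Mathlib
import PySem

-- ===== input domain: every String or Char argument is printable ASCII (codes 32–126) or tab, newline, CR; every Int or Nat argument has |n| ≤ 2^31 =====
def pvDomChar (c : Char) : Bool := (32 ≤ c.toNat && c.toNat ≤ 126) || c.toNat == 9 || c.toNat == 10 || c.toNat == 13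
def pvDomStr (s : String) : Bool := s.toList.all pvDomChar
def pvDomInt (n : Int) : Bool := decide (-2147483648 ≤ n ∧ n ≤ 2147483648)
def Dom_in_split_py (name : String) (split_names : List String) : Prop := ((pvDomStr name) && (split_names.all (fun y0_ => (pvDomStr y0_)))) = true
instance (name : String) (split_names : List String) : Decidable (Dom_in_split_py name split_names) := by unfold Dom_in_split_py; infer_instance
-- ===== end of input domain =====

-- B replaces A's per-call scan over split_names by reconstructing the (at most 7) candidate
-- split keys from `name` itself and doing membership lookups: objective = faster (asymptotic).

-- ===== PORT A =====
-- the dict literal A rebuilds in each loop iteration (hoisted as a helper; it is a constant)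
def pvPrefixMap : PySem.Dict String String := PySem.Dict.ofList
  [("beethoven", "beethoven_piano_sonatas"),
   ("haydn", "haydn_piano_sonatas"),
   ("mozart", "mozart_piano_sonatas"),
   ("chopin", "humdrum_chopin_first_editions"),
   ("joplin", "joplin"),
   ("scarlatti", "scarlatti_keyboard_sonatas")]

-- the `for split_name in split_names:` loop with its early returns
def inSplitLoop (name : String) : List String → Bool
  | [] => false
  | split_name :: rest =>
    if PySem.Str.isIn "#" split_name then
      match PySem.Str.splitMax? split_name "#" 1 with
      | some (pfx :: piece :: _) =>
        (match pvPrefixMap.get? pfx with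
         | some mapped =>
           if name == mapped ++ "_" ++ piece then true else inSplitLoop name rest
         | none => inSplitLoop name rest)
      | _ => inSplitLoop name rest  -- unreachable: '#' in split_name gives exactly 2 parts
    else if PySem.Str.startswith name "musesyn_" then
      if PySem.Str.slice name (some 8) none == split_name then true
      else inSplitLoop name rest
    else inSplitLoop name rest

def in_split_py (name : String) (split_names : List String) : Bool :=
  if split_names.contains name then true
  else inSplitLoop name split_names

-- ===== PORT B =====
-- the fixed prefix map, iterated as .items() in Source B
def pvPairs : List (String × String) :=
  [("beethoven", "beethoven_piano_sonatas"),
   ("haydn", "haydn_piano_sonatas"),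
   ("mozart", "mozart_piano_sonatas"),
   ("chopin", "humdrum_chopin_first_editions"),
   ("joplin", "joplin"),
   ("scarlatti", "scarlatti_keyboard_sonatas")]

def in_split_py_alt (name : String) (split_names : List String) : Bool :=
  if split_names.contains name then true
  else if PySem.Str.startswith name "musesyn_"
          && !PySem.Str.isIn "#" (PySem.Str.slice name (some 8) none)
          && split_names.contains (PySem.Str.slice name (some 8) none) then true
  else pvPairs.any (fun pr =>
    PySem.Str.startswith name (pr.2 ++ "_")
      && split_names.contains (pr.1 ++ "#" ++ PySem.Str.slice name (some (PySem.Str.len (pr.2 ++ "_"))) none))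

-- ===== PRECONDITION & SPEC =====
def Spec_in_split_py (name : String) (split_names : List String) (out : Bool) : Prop := out = in_split_py_alt name split_names
instance (name : String) (split_names : List String) (out : Bool) : Decidable (Spec_in_split_py name split_names out) := by unfold Spec_in_split_py; infer_instance

-- ===== CLAIM (what is proved, stated in full; the proofs are below) =====
def Claim_equal_in_split_py : Prop := ∀ (name : String) (split_names : List String), Dom_in_split_py name split_names → Spec_in_split_py name split_names (in_split_py name split_names)


-- ===== LEMMAS AND PROOFS =====

-- the loop body's success condition for a single split_name (no recursion)
def pvBodyCond (name s : String) : Bool :=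
  if PySem.Str.isIn "#" s then
    match PySem.Str.splitMax? s "#" 1 with
    | some (pfx :: piece :: _) =>
      (match pvPrefixMap.get? pfx with
       | some mapped => name == mapped ++ "_" ++ piece
       | none => false)
    | _ => false
  else if PySem.Str.startswith name "musesyn_" then
    PySem.Str.slice name (some 8) none == s
  else false

-- the candidate split keys B reconstructs from `name`
def pvCands (name : String) : List String :=
  (if PySem.Str.startswith name "musesyn_"
      && !PySem.Str.isIn "#" (PySem.Str.slice name (some 8) none)
   then [PySem.Str.slice name (some 8) none] else [])
  ++ pvPairs.filterMap (fun pr =>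
      if PySem.Str.startswith name (pr.2 ++ "_")
      then some (pr.1 ++ "#" ++ PySem.Str.slice name (some (PySem.Str.len (pr.2 ++ "_"))) none)
      else none)

theorem pvLoop_eq_any (name : String) (L : List String) :
    inSplitLoop name L = L.any (pvBodyCond name) := by
  induction L with
  | nil => rfl
  | cons s rest ih =>
    rw [List.any_cons, ← ih, inSplitLoop]
    unfold pvBodyCond
    cases hc : PySem.Str.isIn "#" s
    · simp only [Bool.false_eq_true, if_false]
      cases hs : PySem.Str.startswith name "musesyn_"
      · simp
      · simp only [if_true]
        cases he : (PySem.Str.slice name (some 8) none == s) <;> simp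
    · simp only [if_true]
      rcases hm : PySem.Str.splitMax? s "#" 1 with _ | (_ | ⟨x, _ | ⟨y, t⟩⟩)
      · simp
      · simp
      · simp
      · cases hg : pvPrefixMap.get? x with
        | none => simp [hg]
        | some mapped =>
          simp only [hg]
          cases he : (name == mapped ++ "_" ++ y) <;> simp

theorem pvAny_contains (L C : List String) :
    L.any (fun s => C.contains s) = C.any (fun c => L.contains c) := by
  rw [Bool.eq_iff_iff]
  simp only [List.any_eq_true, List.contains_iff_mem]
  exact ⟨fun ⟨s, hs, hc⟩ => ⟨s, hc, hs⟩, fun ⟨c, hc, hl⟩ => ⟨c, hl, hc⟩⟩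

theorem pvStrExt (s t : String) (h : s.toList = t.toList) : s = t := by
  have := congrArg String.ofList h; simpa using this

theorem pvIsInHash (s : String) : PySem.Str.isIn "#" s = true ↔ '#' ∈ s.toList := by
  rw [PySem.Str.isIn_iff_infix]
  show ['#'] <:+: s.toList ↔ _
  constructor
  · exact fun h => h.subset (List.mem_singleton_self '#')
  · intro h
    obtain ⟨a, b, hab⟩ := List.append_of_mem h
    exact ⟨a, b, by rw [hab]; simp⟩

theorem pvStartswithIff (s p : String) :
    PySem.Str.startswith s p = true ↔ p.toList <+: s.toList := by
  rw [PySem.Str.startswith_eq]; exact PySem.Chars.startswith_iff _ _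

theorem pvSliceLen (name p : String) :
    (PySem.Str.slice name (some (PySem.Str.len p)) none).toList
      = name.toList.drop p.toList.length := by
  rw [PySem.Str.toList_slice, PySem.Chars.slice_eq_listSlice, PySem.Str.len_eq]
  rw [PySem.List.slice_from name.toList (by positivity)]
  simp

theorem pvFirstHash (l : List Char) (h : '#' ∈ l) :
    ∃ u v, l = u ++ '#' :: v ∧ '#' ∉ u := by
  induction l with
  | nil => cases h
  | cons c t ih =>
    by_cases hc : c = '#'
    · exact ⟨[], t, by simp [hc], by simp⟩
    · have ht : '#' ∈ t := by
        rcases List.mem_cons.1 h with h' | h'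
        · exact absurd h'.symm hc
        · exact h'
      obtain ⟨u, v, rfl, hu⟩ := ih ht
      exact ⟨c :: u, v, rfl, by simp [hu, Ne.symm hc]⟩

theorem pvFirstHashUniq {a b c d : List Char} (ha : '#' ∉ a) (hc : '#' ∉ c)
    (h : a ++ '#' :: b = c ++ '#' :: d) : a = c ∧ b = d := by
  induction a generalizing c with
  | nil =>
    cases c with
    | nil => simpa using h
    | cons x xs =>
      simp at h
      exact absurd (h.1 ▸ List.mem_cons_self) hc
  | cons x xs ih =>
    cases c with
    | nil =>
      simp at h
      exact absurd (h.1.symm ▸ List.mem_cons_self) ha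
    | cons y ys =>
      simp at h
      obtain ⟨rfl, h2⟩ := h
      have := ih (fun hm => ha (List.mem_cons_of_mem _ hm))
        (fun hm => hc (List.mem_cons_of_mem _ hm)) h2
      exact ⟨by rw [this.1], this.2⟩

theorem pvGoZero (fuel : Nat) (l cur : List Char) (acc : List (List Char)) :
    PySem.Chars.splitOnMax.go ['#'] fuel 0 l cur acc = acc.reverse ++ [cur.reverse ++ l] := by
  cases fuel with
  | zero => rw [PySem.Chars.splitOnMax.go.eq_def]; simp
  | succ f => cases l with
    | nil => rw [PySem.Chars.splitOnMax.go.eq_def]; simp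
    | cons c t => rw [PySem.Chars.splitOnMax.go.eq_def]; simp

theorem pvGoScan (u : List Char) (fuel : Nat) (hu : '#' ∉ u) (hf : u.length < fuel)
    (v cur : List Char) (acc : List (List Char)) :
    PySem.Chars.splitOnMax.go ['#'] fuel 1 (u ++ '#' :: v) cur acc
      = acc.reverse ++ [cur.reverse ++ u, v] := by
  induction u generalizing fuel cur acc with
  | nil =>
    cases fuel with
    | zero => omega
    | succ f =>
      simp only [List.nil_append]
      rw [PySem.Chars.splitOnMax.go.eq_def]
      simp [List.isPrefixOf, pvGoZero]
  | cons c t ih =>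
    cases fuel with
    | zero => omega
    | succ f =>
      have hc : c ≠ '#' := fun h => hu (h ▸ List.mem_cons_self)
      have ht : '#' ∉ t := fun h => hu (List.mem_cons_of_mem _ h)
      simp only [List.cons_append]
      rw [PySem.Chars.splitOnMax.go.eq_def]
      simp only [List.isPrefixOf]
      rw [if_neg (by omega)]
      have hbeq : ('#' == c) = false := beq_eq_false_iff_ne.2 (Ne.symm hc)
      simp only [hbeq, Bool.false_and, Bool.false_eq_true, if_false]
      rw [ih f ht (by simp at hf ⊢; omega)]
      simp

theorem pvSplitHash (s : String) (u v : List Char) (hs : s.toList = u ++ '#' :: v)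
    (hu : '#' ∉ u) :
    ∃ p q : String, PySem.Str.splitMax? s "#" 1 = some [p, q] ∧ p.toList = u ∧ q.toList = v := by
  have hchars : PySem.Chars.splitMax? s.toList "#".toList 1 = some [u, v] := by
    have h1 : "#".toList = ['#'] := rfl
    rw [h1, PySem.Chars.splitMax?, if_neg (by simp), PySem.Chars.splitOnMax]
    rw [if_neg (by norm_num)]
    simp only [hs, Int.toNat_one]
    rw [pvGoScan u _ hu (by simp) v [] []]
    simp
  have hmap := PySem.Str.splitMax?_map s "#" 1
  rw [hchars] at hmap
  cases hsp : PySem.Str.splitMax? s "#" 1 with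
  | none => rw [hsp] at hmap; simp at hmap
  | some l =>
    rw [hsp] at hmap
    simp only [Option.map_some, Option.some.injEq] at hmap
    match l, hmap with
    | [p, q], hmap =>
      simp at hmap
      exact ⟨p, q, rfl, hmap.1, hmap.2⟩

theorem pvItems : pvPrefixMap.items = pvPairs := by rfl

theorem pvNodup : pvPrefixMap.keys.Nodup := by decide

theorem pvNoHashShort : ∀ pr ∈ pvPairs, '#' ∉ pr.1.toList := by decide

theorem pvMemIteSingleton {α : Type} (c : Bool) (x y : α) :
    (y ∈ if c = true then [x] else []) ↔ c = true ∧ y = x := by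
  cases c <;> simp

theorem pvIteSomeNone {α : Type} (c : Bool) (a y : α) :
    ((if c = true then some a else none) = some y) ↔ c = true ∧ y = a := by
  cases c <;> simp [eq_comm]

theorem pvAnyFilterMap (name : String) (L : List String) (l : List (String × String)) :
    (l.filterMap (fun pr =>
        if PySem.Str.startswith name (pr.2 ++ "_")
        then some (pr.1 ++ "#" ++ PySem.Str.slice name (some (PySem.Str.len (pr.2 ++ "_"))) none)
        else none)).any (fun c => L.contains c)
      = l.any (fun pr =>
          PySem.Str.startswith name (pr.2 ++ "_")
            && L.contains (pr.1 ++ "#" ++ PySem.Str.slice name (some (PySem.Str.len (pr.2 ++ "_"))) none)) := by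
  induction l with
  | nil => rfl
  | cons pr t ih =>
    rw [List.filterMap_cons]
    cases hsw : PySem.Str.startswith name (pr.2 ++ "_")
    · simp only [hsw, Bool.false_eq_true, if_false, List.any_cons, Bool.false_and, Bool.false_or]
      exact ih
    · simp only [hsw, if_true, List.any_cons, Bool.true_and]
      rw [ih]

theorem pvMemCands (name s : String) :
    s ∈ pvCands name ↔
      ((PySem.Str.startswith name "musesyn_"
          && !PySem.Str.isIn "#" (PySem.Str.slice name (some 8) none)) = true
        ∧ s = PySem.Str.slice name (some 8) none)
      ∨ ∃ pr ∈ pvPairs, PySem.Str.startswith name (pr.2 ++ "_") = true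
          ∧ s = pr.1 ++ "#" ++ PySem.Str.slice name (some (PySem.Str.len (pr.2 ++ "_"))) none := by
  unfold pvCands
  simp only [List.mem_append, pvMemIteSingleton, List.mem_filterMap, pvIteSomeNone]

theorem pvBody_iff (name s : String) : pvBodyCond name s = true ↔ s ∈ pvCands name := by
  rw [pvMemCands]
  by_cases hmem : '#' ∈ s.toList
  · obtain ⟨u, v, hsl, hu⟩ := pvFirstHash s.toList hmem
    obtain ⟨p, q, hsp, hp, hq⟩ := pvSplitHash s u v hsl hu
    unfold pvBodyCond
    rw [if_pos ((pvIsInHash s).2 hmem), hsp]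
    dsimp only
    constructor
    · intro h
      cases hg : pvPrefixMap.get? p with
      | none => rw [hg] at h; simp at h
      | some mapped =>
        rw [hg] at h
        have hname : name = mapped ++ "_" ++ q := by simpa using h
        have hpm : (p, mapped) ∈ pvPairs := by
          have := (PySem.Dict.get?_eq_some_iff_mem_items pvPrefixMap p mapped pvNodup).1 hg
          rwa [pvItems] at this
        refine Or.inr ⟨(p, mapped), hpm, ?_, ?_⟩
        · exact (pvStartswithIff name (mapped ++ "_")).2
            ⟨q.toList, by rw [hname]; simp [String.toList_append]⟩
        · apply pvStrExt
          rw [String.toList_append, String.toList_append, pvSliceLen, hsl, hp]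
          have hdrop : name.toList.drop ((mapped ++ "_").toList.length) = q.toList := by
            rw [hname]
            simp only [String.toList_append]
            have he : mapped.toList ++ "_".toList ++ q.toList
                = (mapped.toList ++ "_".toList) ++ q.toList := by simp
            rw [he, List.length_append]
            simpa using (List.drop_left (l₁ := mapped.toList ++ "_".toList) (l₂ := q.toList))
          rw [hdrop, hq]
          simp
    · rintro (⟨hm, hseq⟩ | ⟨pr, hpr, hsw, hseq⟩)
      · exfalso
        simp only [Bool.and_eq_true, Bool.not_eq_eq_eq_not, Bool.not_true] at hm
        have : PySem.Str.isIn "#" (PySem.Str.slice name (some 8) none) = true :=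
          (pvIsInHash _).2 (hseq ▸ hmem)
        rw [this] at hm
        exact absurd hm.2 (by simp)
      · have hstl : s.toList
            = pr.1.toList ++ '#' :: (name.toList.drop ((pr.2 ++ "_").toList.length)) := by
          rw [hseq, String.toList_append, String.toList_append, pvSliceLen]
          simp
        have h1 := pvFirstHashUniq hu (pvNoHashShort pr hpr) (hsl.symm.trans hstl)
        have hpq : p = pr.1 := pvStrExt _ _ (hp.trans h1.1)
        have hg : pvPrefixMap.get? p = some pr.2 := by
          rw [hpq]
          exact PySem.Dict.get?_of_mem_items pvPrefixMap (by rw [pvItems]; simpa using hpr) pvNodup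
        simp only [hg]
        have hpre := (pvStartswithIff name (pr.2 ++ "_")).1 hsw
        have hname : name = pr.2 ++ "_" ++ q := by
          apply pvStrExt
          rw [String.toList_append, String.toList_append]
          have hthis := (List.prefix_iff_eq_append.1 hpre)
          conv_lhs => rw [← hthis]
          rw [hq, h1.2]
          simp [String.toList_append]
        simp [hname]
  · unfold pvBodyCond
    rw [if_neg (fun hc => hmem ((pvIsInHash s).1 hc))]
    constructor
    · intro h
      by_cases hsw : PySem.Str.startswith name "musesyn_" = true
      · rw [if_pos hsw] at h
        have hseq : PySem.Str.slice name (some 8) none = s := by simpa using h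
        refine Or.inl ⟨?_, hseq.symm⟩
        have hni : PySem.Str.isIn "#" (PySem.Str.slice name (some 8) none) = false := by
          cases hii : PySem.Str.isIn "#" (PySem.Str.slice name (some 8) none)
          · rfl
          · exact absurd ((pvIsInHash _).1 (hseq ▸ hii)) hmem
        rw [hsw, hni]
        rfl
      · rw [if_neg hsw] at h
        cases h
    · rintro (⟨hm, hseq⟩ | ⟨pr, hpr, hsw, hseq⟩)
      · simp only [Bool.and_eq_true] at hm
        rw [if_pos hm.1]
        simp [hseq]
      · exfalso
        apply hmem
        rw [hseq, String.toList_append, String.toList_append]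
        simp

-- ===== VERDICT (by name: the statement is the Claim_ definition above) =====
theorem in_split_py_spec : Claim_equal_in_split_py := by
  intro name L _
  unfold Spec_in_split_py in_split_py in_split_py_alt
  by_cases hc : L.contains name = true
  · rw [if_pos hc, if_pos hc]
  · rw [if_neg hc, if_neg hc, pvLoop_eq_any]
    have hpt : L.any (pvBodyCond name) = L.any (fun s => (pvCands name).contains s) := by
      congr 1
      funext s
      rw [Bool.eq_iff_iff, pvBody_iff, List.contains_iff_mem]
    rw [hpt, pvAny_contains]
    unfold pvCands
    rw [List.any_append, pvAnyFilterMap]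
    cases hmu : (PySem.Str.startswith name "musesyn_"
        && !PySem.Str.isIn "#" (PySem.Str.slice name (some 8) none))
    · simp
    · cases hc8 : L.contains (PySem.Str.slice name (some 8) none)
      · simp
        intro hm
        rw [List.contains_iff_mem.2 hm] at hc8
        simp at hc8
      · simp
        exact Or.inl (List.contains_iff_mem.1 hc8)
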